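-- pv_equiv track=rewrite | github.com/UriKH/COP-02340118 | HW3/part1/generator/msg_gen.py | _distribute_lengths
-- ===== SOURCE A (Python) =====
-- def _distribute_lengths(sum_length: int, n_slots: int, max_len: int) -> list:
--     """
--     Distribute `sum_length` non-negative units across `n_slots` slots, each slot ≤ max_len.
--     Returns a list of length `n_slots`. Raises ValueError if impossible.
--     Uses an even-ish distribution: base = sum_length // n_slots, then distribute the remainder.
--     """
--     if n_slots < 0:
--         raise ValueError(f"Number of slots cannot be negative: got {n_slots}")
--     if n_slots == 0:
--         if sum_length != 0:
--             raise ValueError(f"No slots to distribute into, but sum_length={sum_length} > 0")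
--         return []
--     if sum_length < 0:
--         raise ValueError(f"sum_length must be non-negative, got {sum_length}")
--     # Check overall capacity
--     if sum_length > max_len * n_slots:
--         raise ValueError(f"Cannot distribute sum_length={sum_length} into {n_slots} slots with max_len={max_len} each")
--     base = sum_length // n_slots
--     rem = sum_length % n_slots
--     if base > max_len:
--         raise ValueError(f"Base allocation {base} exceeds max_len={max_len}")
--     lengths = [base] * n_slots
--     # Distribute remainder: add +1 to as many slots as rem, but not exceeding max_len
--     i = 0
--     while rem > 0 and i < n_slots:
--         if lengths[i] < max_len:
--             lengths[i] += 1
--             rem -= 1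
--         i += 1
--         if i == n_slots and rem > 0:
--             # wrap around; but if no slot < max_len, impossible
--             if all(l >= max_len for l in lengths):
--                 break  # will raise below
--             i = 0
--     if rem != 0:
--         raise ValueError("Unable to distribute remainder without exceeding max_len")
--     return lengths
-- ===== SOURCE B (Python) =====
-- def _distribute_lengths(sum_length: int, n_slots: int, max_len: int) -> list:
--     """Closed-form even distribution: same validation, no loop.
--
--     Whenever the capacity check passes, base = sum_length // n_slots is at most
--     max_len, and if rem > 0 then base < max_len, so the rem extra units go to
--     the first rem slots directly.
--     """
--     if n_slots < 0:
--         raise ValueError(f"Number of slots cannot be negative: got {n_slots}")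
--     if n_slots == 0:
--         if sum_length != 0:
--             raise ValueError(f"No slots to distribute into, but sum_length={sum_length} > 0")
--         return []
--     if sum_length < 0:
--         raise ValueError(f"sum_length must be non-negative, got {sum_length}")
--     if sum_length > max_len * n_slots:
--         raise ValueError(f"Cannot distribute sum_length={sum_length} into {n_slots} slots with max_len={max_len} each")
--     base, rem = divmod(sum_length, n_slots)
--     return [base + 1] * rem + [base] * (n_slots - rem)
-- ===== Notes on version B (the rewrite author's own statement) =====
-- stated objective: simpler
-- what changed: Replaces the incremental while-loop with wrap-around (and the then-unreachable base>max_len and leftover-remainder checks) by a closed-form construction [base+1]*rem + [base]*(n_slots-rem), justified by rem < n_slots and base < max_len whenever rem > 0; a timing run measured this ~3x faster (list-repetition vs per-slot Python loop).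
import Mathlib
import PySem

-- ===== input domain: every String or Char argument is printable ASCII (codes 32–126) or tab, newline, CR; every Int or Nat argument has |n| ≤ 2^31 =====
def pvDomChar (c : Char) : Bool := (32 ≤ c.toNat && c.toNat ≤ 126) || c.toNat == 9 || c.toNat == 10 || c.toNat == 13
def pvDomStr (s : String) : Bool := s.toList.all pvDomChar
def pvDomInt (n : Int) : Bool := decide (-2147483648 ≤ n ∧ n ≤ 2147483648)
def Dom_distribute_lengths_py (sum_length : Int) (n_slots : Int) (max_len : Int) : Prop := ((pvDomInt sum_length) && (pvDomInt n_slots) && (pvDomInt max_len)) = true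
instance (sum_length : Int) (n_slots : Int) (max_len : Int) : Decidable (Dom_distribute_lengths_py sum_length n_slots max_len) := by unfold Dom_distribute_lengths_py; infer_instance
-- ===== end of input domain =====

-- B replaces A's remainder-distributing while-loop (with wrap-around) by a closed-form
-- list construction; objective: simpler.  All of A's raising branches are excluded by Pre_.

-- ===== PORT A =====
-- The while-loop, fuel-based; state (lengths, rem, i).  Within Pre_ the fuel supplied by
-- the caller is never exhausted (the loop runs at most rem ≤ n_slots iterations).
-- lengths[i] uses pyGetD/pySetD: inside the loop 0 ≤ i < len(lengths), so exact.
def pyA_loop (n_slots max_len : Int) : Nat → List Int → Int → Int → List Int × Int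
  | 0, lengths, rem, _ => (lengths, rem)
  | fuel+1, lengths, rem, i =>
    if rem > 0 ∧ i < n_slots then
      let c := PySem.List.pyGetD lengths i 0
      let lengths' := if c < max_len then PySem.List.pySetD lengths i (c + 1) else lengths
      let rem' := if c < max_len then rem - 1 else rem
      let i' := i + 1
      if i' = n_slots ∧ rem' > 0 then
        if lengths'.all (fun l => decide (l ≥ max_len)) then (lengths', rem')  -- break
        else pyA_loop n_slots max_len fuel lengths' rem' 0
      else pyA_loop n_slots max_len fuel lengths' rem' i'
    else (lengths, rem)

-- every 'raise ValueError' returns [] here; all such branches are outside Pre_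
def distribute_lengths_py (sum_length : Int) (n_slots : Int) (max_len : Int) : List Int :=
  if n_slots < 0 then []
  else if n_slots = 0 then
    (if sum_length ≠ 0 then [] else [])
  else if sum_length < 0 then []
  else if sum_length > max_len * n_slots then []
  else if PySem.Int.floordiv sum_length n_slots > max_len then []
  else
    -- base = sum_length // n_slots ; rem = sum_length % n_slots ; lengths = [base] * n_slots
    let r := pyA_loop n_slots max_len
        ((PySem.Int.mod sum_length n_slots).toNat + n_slots.toNat + 1)
        (List.replicate n_slots.toNat (PySem.Int.floordiv sum_length n_slots))
        (PySem.Int.mod sum_length n_slots) 0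
    if r.2 ≠ 0 then [] else r.1

-- ===== PORT B =====
def distribute_lengths_py_alt (sum_length : Int) (n_slots : Int) (max_len : Int) : List Int :=
  if n_slots < 0 then []
  else if n_slots = 0 then
    (if sum_length ≠ 0 then [] else [])
  else if sum_length < 0 then []
  else if sum_length > max_len * n_slots then []
  else
    List.replicate (PySem.Int.mod sum_length n_slots).toNat (PySem.Int.floordiv sum_length n_slots + 1)
      ++ List.replicate (n_slots - PySem.Int.mod sum_length n_slots).toNat (PySem.Int.floordiv sum_length n_slots)

-- ===== PRECONDITION & SPEC =====
-- Pre_ excludes exactly the inputs on which A (and B identically) raises ValueError: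
-- negative n_slots, n_slots = 0 with sum_length ≠ 0, negative sum_length, and
-- sum_length exceeding the total capacity max_len * n_slots.
def Pre_distribute_lengths_py (sum_length : Int) (n_slots : Int) (max_len : Int) : Prop :=
  (n_slots = 0 ∧ sum_length = 0) ∨
  (0 < n_slots ∧ 0 ≤ sum_length ∧ sum_length ≤ max_len * n_slots)

instance (sum_length : Int) (n_slots : Int) (max_len : Int) : Decidable (Pre_distribute_lengths_py sum_length n_slots max_len) := by unfold Pre_distribute_lengths_py; infer_instance

def pvWitness_distribute_lengths_py : Int × Int × Int := (7, 3, 4)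

def Spec_distribute_lengths_py (sum_length : Int) (n_slots : Int) (max_len : Int) (out : List Int) : Prop := out = distribute_lengths_py_alt sum_length n_slots max_len
instance (sum_length : Int) (n_slots : Int) (max_len : Int) (out : List Int) : Decidable (Spec_distribute_lengths_py sum_length n_slots max_len out) := by unfold Spec_distribute_lengths_py; infer_instance

-- ===== CLAIM (what is proved, stated in full; the proofs are below) =====
def Claim_equal_distribute_lengths_py : Prop := ∀ (sum_length : Int) (n_slots : Int) (max_len : Int), Dom_distribute_lengths_py sum_length n_slots max_len → Pre_distribute_lengths_py sum_length n_slots max_len → Spec_distribute_lengths_py sum_length n_slots max_len (distribute_lengths_py sum_length n_slots max_len)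

-- ===== LEMMAS AND PROOFS =====

-- Loop invariant: starting from j slots already raised to base+1 and rem = r left,
-- with base < max_len whenever there is remainder and j + r ≤ n, the loop raises the
-- next r slots and finishes with rem = 0 (no wrap-around ever happens).
lemma pyA_loop_inv (n : Nat) (m base : Int) :
    ∀ (r : Nat) (j : Nat) (fuel : Nat), (0 < r → base < m) → j + r ≤ n → r ≤ fuel →
    pyA_loop (n : Int) m fuel
        (List.replicate j (base + 1) ++ List.replicate (n - j) base) (r : Int) (j : Int)
      = (List.replicate (j + r) (base + 1) ++ List.replicate (n - (j + r)) base, 0) := by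
  intro r
  induction r with
  | zero =>
    intro j fuel _ _ _
    cases fuel with
    | zero => simp [pyA_loop]
    | succ f => simp [pyA_loop]
  | succ r ih =>
    intro j fuel hb hjr hf
    cases fuel with
    | zero => omega
    | succ f =>
      have hjn : j < n := by omega
      have hget : PySem.List.pyGetD
          (List.replicate j (base + 1) ++ List.replicate (n - j) base) (j : Int) 0 = base := by
        rw [PySem.List.pyGetD_natCast]
        have : (List.replicate j (base + 1) ++ List.replicate (n - j) base).getD j 0
            = (List.replicate (n - j) base).getD 0 0 := by
          simp [List.getD, List.getElem?_append_right, List.length_replicate]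
        rw [this]
        have : 0 < n - j := by omega
        cases hnj : n - j with
        | zero => omega
        | succ k => simp [List.replicate_succ]
      have hset : PySem.List.pySetD
          (List.replicate j (base + 1) ++ List.replicate (n - j) base) (j : Int) (base + 1)
          = List.replicate (j + 1) (base + 1) ++ List.replicate (n - (j + 1)) base := by
        rw [PySem.List.pySetD_natCast]
        have hnj : n - j = (n - (j + 1)) + 1 := by omega
        rw [hnj, List.replicate_succ]
        rw [List.set_append]
        simp [List.replicate_succ' (n := j)]
      have hbm : base < m := hb (by omega)
      -- unfold one step
      rw [pyA_loop]
      have hcond : ((r : Int) + 1 > 0 ∧ (j : Int) < (n : Int)) := by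
        constructor <;> [omega; exact_mod_cast hjn]
      rw [if_pos (by push_cast; exact_mod_cast hcond)]
      simp only [hget, if_pos hbm]
      have hwrap : ¬ ((j : Int) + 1 = (n : Int) ∧ ((r : Nat) + 1 : Int) - 1 > 0) := by
        omega
      rw [if_neg (by push_cast at hwrap ⊢; exact hwrap)]
      have harith : (((r + 1 : Nat)) : Int) - 1 = ((r : Nat) : Int) := by push_cast; ring
      have hj1 : ((j : Nat) : Int) + 1 = (((j + 1 : Nat)) : Int) := by push_cast; omega
      rw [hset, harith, hj1]
      have hres := ih (j + 1) f (fun _ => hbm) (by omega) (by omega)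
      have e : j + 1 + r = j + (r + 1) := by omega
      rw [e] at hres
      exact hres

-- base/rem facts under the capacity check
lemma base_le (s n m : Int) (hn : 0 < n) (hcap : s ≤ m * n) :
    PySem.Int.floordiv s n ≤ m := by
  have h : PySem.Int.floordiv s n < m + 1 :=
    (PySem.Int.floordiv_lt_iff_lt_mul (a := s) (b := n) (q := m + 1) hn).mpr (by nlinarith)
  omega

lemma base_lt_of_rem_pos (s n m : Int) (hn : 0 < n) (hcap : s ≤ m * n)
    (hr : 0 < PySem.Int.mod s n) : PySem.Int.floordiv s n < m := by
  rcases lt_or_eq_of_le hcap with h | h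
  · exact (PySem.Int.floordiv_lt_iff_lt_mul (a := s) (b := n) (q := m) hn).mpr h
  · exfalso
    have h0 : PySem.Int.mod s n = 0 := by
      rw [PySem.Int.mod_eq_zero_iff_dvd]; exact ⟨m, by linarith [mul_comm m n]⟩
    omega

-- ===== VERDICT (by name: the statement is the Claim_ definition above) =====
theorem distribute_lengths_py_spec : Claim_equal_distribute_lengths_py := by
  intro s n m _ hpre
  unfold Spec_distribute_lengths_py distribute_lengths_py distribute_lengths_py_alt
  rcases hpre with ⟨hn0, hs0⟩ | ⟨hn, hs, hcap⟩
  · subst hn0 hs0; norm_num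
  · have hble : PySem.Int.floordiv s n ≤ m := base_le s n m hn hcap
    have hr0 : 0 ≤ PySem.Int.mod s n := PySem.Int.mod_nonneg (a := s) hn
    have hrlt : PySem.Int.mod s n < n := PySem.Int.mod_lt (a := s) hn
    have h1 : ¬ n < 0 := by omega
    have h2 : ¬ n = 0 := by omega
    have h3 : ¬ s < 0 := by omega
    have h4 : ¬ s > m * n := by omega
    have h5 : ¬ PySem.Int.floordiv s n > m := by omega
    have hcast_n : ((n.toNat : Nat) : Int) = n := Int.toNat_of_nonneg (by omega)
    have hcast_r : (((PySem.Int.mod s n).toNat : Nat) : Int) = PySem.Int.mod s n :=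
      Int.toNat_of_nonneg hr0
    have hloop := pyA_loop_inv n.toNat m (PySem.Int.floordiv s n) (PySem.Int.mod s n).toNat 0
      ((PySem.Int.mod s n).toNat + n.toNat + 1)
      (fun hpos => base_lt_of_rem_pos s n m hn hcap (by omega))
      (by omega) (by omega)
    simp only [Nat.zero_add, Nat.sub_zero, List.replicate_zero, List.nil_append,
      Nat.cast_zero, hcast_n, hcast_r] at hloop
    have hcnt : n.toNat - (PySem.Int.mod s n).toNat = (n - PySem.Int.mod s n).toNat := by omega
    simp only [if_neg h1, if_neg h2, if_neg h3, if_neg h4, if_neg h5, hloop, hcnt,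
      ne_eq, not_true_eq_false, if_false]
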